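-- pv_equiv track=rewrite | github.com/johncbowers/koebepy | WIP/visualize2D.py | _depths_from_parent_map
-- ===== SOURCE A (Python) =====
-- from collections import deque, defaultdict
--
-- def _depths_from_parent_map(parent_map, root):
--     """Compute BFS depths for vertices in the parent map."""
--     if root is None:
--         return {}
--     depths = {root: 0}
--     queue = deque([root])
--     children = {}
--     for v, p in parent_map.items():
--         if p is None:
--             continue
--         children.setdefault(p, []).append(v)
--     while queue:
--         v = queue.popleft()
--         for child in children.get(v, []):
--             if child in depths:
--                 continue
--             depths[child] = depths[v] + 1
--             queue.append(child)
--     return depths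
-- ===== SOURCE B (Python) =====
-- def _depths_from_parent_map(parent_map, root):
--     """Level-synchronous variant: no children adjacency dict and no deque;
--     each round scans parent_map once per frontier vertex and labels the
--     newly reached vertices with the current level."""
--     if root is None:
--         return {}
--     depths = {root: 0}
--     frontier = [root]
--     d = 0
--     while frontier:
--         d += 1
--         nxt = []
--         for v in frontier:
--             for c, p in parent_map.items():
--                 if p == v and c not in depths:
--                     depths[c] = d
--                     nxt.append(c)
--         frontier = nxt
--     return depths
-- ===== Notes on version B (the rewrite author's own statement) =====
-- stated objective: simpler
-- what changed: Drops A's children-adjacency dict and deque-based BFS; B runs a level-synchronous loop that rescans parent_map once per frontier vertex and labels new vertices with a level counter instead of depths[parent]+1.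
import Mathlib
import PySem

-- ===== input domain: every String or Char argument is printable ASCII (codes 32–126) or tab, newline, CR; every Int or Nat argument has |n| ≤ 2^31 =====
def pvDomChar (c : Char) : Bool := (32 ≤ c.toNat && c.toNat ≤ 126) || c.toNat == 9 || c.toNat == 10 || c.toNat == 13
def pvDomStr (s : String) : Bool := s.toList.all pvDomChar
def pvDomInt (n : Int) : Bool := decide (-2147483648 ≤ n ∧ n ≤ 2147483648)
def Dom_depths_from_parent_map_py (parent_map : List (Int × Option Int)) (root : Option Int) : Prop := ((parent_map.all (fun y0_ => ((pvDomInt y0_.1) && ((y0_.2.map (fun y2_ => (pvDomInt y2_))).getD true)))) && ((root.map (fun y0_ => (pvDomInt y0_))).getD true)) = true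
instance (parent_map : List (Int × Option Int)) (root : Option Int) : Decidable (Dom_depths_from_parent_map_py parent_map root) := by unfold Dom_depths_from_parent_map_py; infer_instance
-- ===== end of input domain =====

-- B replaces A's children-adjacency dict + deque BFS by a level-synchronous loop that
-- rescans parent_map per frontier vertex; objective: simpler (no speed claim).

-- Helpers shared by the two termination measures (cited by name in decreasing_by).
-- pvDictU L d = how many entries of L are not yet keys of d.
def pvDictU (L : List Int) (d : PySem.Dict Int Int) : Nat :=
  L.countP (fun k => !d.contains k)

theorem pvDictU_insert_le (L : List Int) (d : PySem.Dict Int Int) (c : Int) (w : Int) :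
    pvDictU L (d.insert c w) ≤ pvDictU L d := by
  apply List.countP_mono_left
  intro a _ h
  simp only [PySem.Dict.contains_insert, Bool.not_eq_eq_eq_not, Bool.not_true, Bool.or_eq_false_iff] at h ⊢
  exact h.2

theorem pvDictU_insert_lt (L : List Int) (d : PySem.Dict Int Int) (c : Int) (w : Int)
    (hc : c ∈ L) (h : d.contains c = false) :
    pvDictU L (d.insert c w) + 1 ≤ pvDictU L d := by
  induction L with
  | nil => simp at hc
  | cons a L ih =>
    have hmono : (if (!(d.insert c w).contains a) = true then 1 else 0) ≤
        (if (!d.contains a) = true then 1 else 0) := by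
      by_cases hda : d.contains a = true
      · have h1 : (d.insert c w).contains a = true := by
          rw [PySem.Dict.contains_insert]; simp [hda]
        simp [h1, hda]
      · have h2 : (!d.contains a) = true := by simp [Bool.eq_false_iff.mpr hda]
        simp only [h2, if_true]
        split_ifs <;> omega
    by_cases hac : a = c
    · subst hac
      have h1 : (!(d.insert a w).contains a) = false := by
        simp [PySem.Dict.contains_insert_self]
      have h2 : (!d.contains a) = true := by simp [h]
      have hle := pvDictU_insert_le L d a w
      simp only [pvDictU] at hle
      simp only [pvDictU, List.countP_cons, h1, h2]
      simp
      omega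
    · have ha : c ∈ L := by
        rcases List.mem_cons.mp hc with h' | h'
        · exact absurd h'.symm hac
        · exact h'
      have := ih ha
      simp only [pvDictU, List.countP_cons] at *
      omega

-- Generic accounting for a fold over a (dict, accumulator) state.
theorem pvFoldl_acct {α : Type} (L : List Int)
    (step : PySem.Dict Int Int × List Int → α → PySem.Dict Int Int × List Int)
    (l : List α)
    (h : ∀ st x, x ∈ l →
      pvDictU L (step st x).1 + (step st x).2.length ≤ pvDictU L st.1 + st.2.length ∧
      pvDictU L (step st x).1 ≤ pvDictU L st.1) :
    ∀ st, pvDictU L (l.foldl step st).1 + (l.foldl step st).2.length ≤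
            pvDictU L st.1 + st.2.length ∧
          pvDictU L (l.foldl step st).1 ≤ pvDictU L st.1 := by
  induction l with
  | nil => intro st; simp
  | cons a l ih =>
    intro st
    have hh := h st a (by simp)
    have ihh := ih (fun st x hx => h st x (by simp [hx])) (step st a)
    simp only [List.foldl_cons]
    omega

-- ===== PORT A =====
-- children.setdefault(p, []).append(v) loop of A.
def pvChildren (parent_map : List (Int × Option Int)) : PySem.Dict Int (List Int) :=
  parent_map.foldl
    (fun d q => match q.2 with
      | none => d
      | some p => d.modify p [] (fun l => l ++ [q.1]))
    PySem.Dict.empty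

-- body of A's inner 'for child in children.get(v, [])' loop; state = (depths, queue).
-- depths[v] is read as getD v 0: v is always a key when this runs (Python would raise otherwise).
def pvStepA (v : Int) (st : PySem.Dict Int Int × List Int) (c : Int) :
    PySem.Dict Int Int × List Int :=
  if st.1.contains c then st else (st.1.insert c (st.1.getD v 0 + 1), st.2 ++ [c])

theorem pvMem_getD_values (children : PySem.Dict Int (List Int)) (v c : Int)
    (hc : c ∈ children.getD v []) : c ∈ children.values.flatten := by
  rcases hg : children.get? v with _ | l
  · rw [PySem.Dict.getD_eq_get?_getD, hg] at hc; simp at hc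
  · rw [PySem.Dict.getD_eq_get?_getD, hg] at hc
    simp only [Option.getD_some] at hc
    have hmem := PySem.Dict.mem_items_of_get?_eq_some children hg
    exact List.mem_flatten.mpr ⟨l, by
      simp only [PySem.Dict.values]
      exact ⟨List.mem_map.mpr ⟨(v, l), hmem, rfl⟩, hc⟩⟩

theorem pvStepA_acct (children : PySem.Dict Int (List Int)) (v : Int)
    (st : PySem.Dict Int Int × List Int) (c : Int) (hc : c ∈ children.getD v []) :
    pvDictU children.values.flatten (pvStepA v st c).1 + (pvStepA v st c).2.length ≤
      pvDictU children.values.flatten st.1 + st.2.length ∧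
    pvDictU children.values.flatten (pvStepA v st c).1 ≤ pvDictU children.values.flatten st.1 := by
  unfold pvStepA
  split_ifs with h
  · exact ⟨le_refl _, le_refl _⟩
  · have hlt := pvDictU_insert_lt children.values.flatten st.1 c (st.1.getD v 0 + 1)
      (pvMem_getD_values children v c hc) (Bool.eq_false_iff.mpr h)
    have hle := pvDictU_insert_le children.values.flatten st.1 c (st.1.getD v 0 + 1)
    simp only [List.length_append, List.length_cons, List.length_nil]
    omega

-- A's 'while queue:' loop.
def pvBFS (children : PySem.Dict Int (List Int)) (depths : PySem.Dict Int Int)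
    (queue : List Int) : PySem.Dict Int Int :=
  match queue with
  | [] => depths
  | v :: qs =>
    let st := (children.getD v []).foldl (pvStepA v) (depths, qs)
    pvBFS children st.1 st.2
termination_by 2 * pvDictU children.values.flatten depths + queue.length
decreasing_by
  have := pvFoldl_acct children.values.flatten (pvStepA v) (children.getD v [])
    (fun st c hc => pvStepA_acct children v st c hc) (depths, qs)
  simp only [List.length_cons]
  dsimp only at this
  omega

def depths_from_parent_map_py (parent_map : List (Int × Option Int)) (root : Option Int) :
    List (Int × Int) :=
  match root with
  | none => []
  | some r =>
    let depths : PySem.Dict Int Int := PySem.Dict.empty.insert r 0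
    let children := pvChildren parent_map
    (pvBFS children depths [r]).items

-- ===== PORT B =====
-- body of B's inner 'for c, p in parent_map.items()' loop; state = (depths, nxt).
def pvStepB (v : Int) (dd : Int) (st : PySem.Dict Int Int × List Int) (q : Int × Option Int) :
    PySem.Dict Int Int × List Int :=
  if q.2 == some v && !st.1.contains q.1 then (st.1.insert q.1 dd, st.2 ++ [q.1]) else st

theorem pvStepB_acct (parent_map : List (Int × Option Int)) (v dd : Int)
    (st : PySem.Dict Int Int × List Int) (q : Int × Option Int) (hq : q ∈ parent_map) :
    pvDictU (parent_map.map (·.1)) (pvStepB v dd st q).1 + (pvStepB v dd st q).2.length ≤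
      pvDictU (parent_map.map (·.1)) st.1 + st.2.length ∧
    pvDictU (parent_map.map (·.1)) (pvStepB v dd st q).1 ≤ pvDictU (parent_map.map (·.1)) st.1 := by
  unfold pvStepB
  split_ifs with h
  · have hcont : st.1.contains q.1 = false := by
      rcases Bool.and_eq_true_iff.mp h with ⟨_, h2⟩
      simpa using h2
    have hlt := pvDictU_insert_lt (parent_map.map (·.1)) st.1 q.1 dd
      (List.mem_map.mpr ⟨q, hq, rfl⟩) hcont
    have hle := pvDictU_insert_le (parent_map.map (·.1)) st.1 q.1 dd
    simp only [List.length_append, List.length_cons, List.length_nil]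
    omega
  · exact ⟨le_refl _, le_refl _⟩

-- B's 'while frontier:' loop; d is the depth of the current frontier.
def pvBLoop (parent_map : List (Int × Option Int)) (depths : PySem.Dict Int Int)
    (frontier : List Int) (d : Int) : PySem.Dict Int Int :=
  match frontier with
  | [] => depths
  | v :: fs =>
    let st := (v :: fs).foldl (fun st v => parent_map.foldl (pvStepB v (d + 1)) st)
      (depths, ([] : List Int))
    pvBLoop parent_map st.1 st.2 (d + 1)
termination_by pvDictU (parent_map.map (·.1)) depths + frontier.length
decreasing_by
  have := pvFoldl_acct (parent_map.map (·.1))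
    (fun st v => parent_map.foldl (pvStepB v (d + 1)) st) (v :: fs)
    (fun st x _ => pvFoldl_acct (parent_map.map (·.1)) (pvStepB x (d + 1)) parent_map
      (fun st q hq => pvStepB_acct parent_map x (d + 1) st q hq) st)
    (depths, ([] : List Int))
  simp only [List.foldl_attach]
  simp only [List.length_cons, List.length_nil] at this ⊢
  omega

def depths_from_parent_map_py_alt (parent_map : List (Int × Option Int)) (root : Option Int) :
    List (Int × Int) :=
  match root with
  | none => []
  | some r => (pvBLoop parent_map (PySem.Dict.empty.insert r 0) [r] 0).items

-- ===== PRECONDITION & SPEC =====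
def Spec_depths_from_parent_map_py (parent_map : List (Int × Option Int)) (root : Option Int) (out : List (Int × Int)) : Prop := out = depths_from_parent_map_py_alt parent_map root
instance (parent_map : List (Int × Option Int)) (root : Option Int) (out : List (Int × Int)) : Decidable (Spec_depths_from_parent_map_py parent_map root out) := by unfold Spec_depths_from_parent_map_py; infer_instance

-- ===== CLAIM (what is proved, stated in full; the proofs are below) =====
def Claim_equal_depths_from_parent_map_py : Prop := ∀ (parent_map : List (Int × Option Int)) (root : Option Int), Dom_depths_from_parent_map_py parent_map root → Spec_depths_from_parent_map_py parent_map root (depths_from_parent_map_py parent_map root)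

-- ===== LEMMAS AND PROOFS =====

-- The children list A's dict lookup produces, expressed directly on parent_map.
def pvChildrenAt (parent_map : List (Int × Option Int)) (v : Int) : List Int :=
  (parent_map.filter (fun q => q.2 == some v)).map (·.1)

theorem pvChildren_getD_aux (v : Int) (l : List (Int × Option Int)) :
    ∀ d : PySem.Dict Int (List Int),
      (l.foldl (fun d q => match q.2 with
        | none => d
        | some p => d.modify p [] (fun cs => cs ++ [q.1])) d).getD v [] =
      d.getD v [] ++ pvChildrenAt l v := by
  induction l with
  | nil => intro d; simp [pvChildrenAt]
  | cons q l ih =>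
    intro d
    rcases q with ⟨c, p?⟩
    rcases p? with _ | p
    · simpa [pvChildrenAt, List.filter_cons] using ih d
    · simp only [List.foldl_cons]
      rw [ih]
      by_cases hv : v = p
      · subst hv
        rw [PySem.Dict.getD_modify]
        simp [pvChildrenAt]
      · rw [PySem.Dict.getD_modify]
        simp only [if_neg hv]
        have : ((c, some p).2 == some v) = false := by
          simp; intro h; exact hv h.symm
        simp [pvChildrenAt, this]

theorem pvChildren_getD (parent_map : List (Int × Option Int)) (v : Int) :
    (pvChildren parent_map).getD v [] = pvChildrenAt parent_map v := by
  have := pvChildren_getD_aux v parent_map PySem.Dict.empty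
  simpa [pvChildren, PySem.Dict.getD_empty] using this

-- A's inner loop over children.get(v, []) equals B's scan of parent_map for vertex v.
theorem pvInner_eq (v D : Int) (l : List (Int × Option Int)) :
    ∀ st : PySem.Dict Int Int × List Int,
      st.1.contains v = true → st.1.getD v 0 = D →
      (pvChildrenAt l v).foldl (pvStepA v) st = l.foldl (pvStepB v (D + 1)) st := by
  induction l with
  | nil => intro st _ _; rfl
  | cons q l ih =>
    intro st hv hD
    rcases hq : (q.2 == some v) with _ | _
    · -- q is not a child of v: both sides skip q
      have hA : pvChildrenAt (q :: l) v = pvChildrenAt l v := by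
        simp [pvChildrenAt, hq]
      have hB : pvStepB v (D + 1) st q = st := by
        simp [pvStepB, hq]
      rw [List.foldl_cons, hB, hA]
      exact ih st hv hD
    · -- q = (c, some v): A folds over c, B's condition reduces to the contains test
      have hA : pvChildrenAt (q :: l) v = q.1 :: pvChildrenAt l v := by
        simp [pvChildrenAt, hq]
      rw [hA, List.foldl_cons, List.foldl_cons]
      by_cases hc : st.1.contains q.1 = true
      · have h1 : pvStepA v st q.1 = st := by simp [pvStepA, hc]
        have h2 : pvStepB v (D + 1) st q = st := by simp [pvStepB, hq, hc]
        rw [h1, h2]; exact ih st hv hD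
      · have hcf : st.1.contains q.1 = false := Bool.eq_false_iff.mpr hc
        have hne : q.1 ≠ v := by
          intro h; rw [h] at hcf; rw [hv] at hcf; cases hcf
        have h1 : pvStepA v st q.1 = (st.1.insert q.1 (D + 1), st.2 ++ [q.1]) := by
          simp [pvStepA, hcf, hD]
        have h2 : pvStepB v (D + 1) st q = (st.1.insert q.1 (D + 1), st.2 ++ [q.1]) := by
          simp [pvStepB, hq, hcf]
        rw [h1, h2]
        refine ih _ ?_ ?_
        · show (st.1.insert q.1 (D + 1)).contains v = true
          rw [PySem.Dict.contains_insert]; simp [hv]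
        · show (st.1.insert q.1 (D + 1)).getD v 0 = D
          rw [PySem.Dict.getD_insert]
          simp [if_neg (Ne.symm hne), hD]

-- A pvStepB fold only appends to the accumulator; the dict is independent of it.
theorem pvFold_accApp (v dd : Int) (l : List (Int × Option Int)) :
    ∀ st : PySem.Dict Int Int × List Int,
      (l.foldl (pvStepB v dd) st).1 = (l.foldl (pvStepB v dd) (st.1, [])).1 ∧
      (l.foldl (pvStepB v dd) st).2 = st.2 ++ (l.foldl (pvStepB v dd) (st.1, [])).2 := by
  induction l with
  | nil => intro st; simp
  | cons q l ih =>
    intro st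
    simp only [List.foldl_cons]
    by_cases hc : (q.2 == some v && !st.1.contains q.1) = true
    · have h1 : pvStepB v dd st q = (st.1.insert q.1 dd, st.2 ++ [q.1]) := by
        simp [pvStepB, hc]
      have h2 : pvStepB v dd (st.1, []) q = (st.1.insert q.1 dd, ([] : List Int) ++ [q.1]) := by
        simp [pvStepB, hc]
      rw [h1, h2]
      have iha := ih (st.1.insert q.1 dd, st.2 ++ [q.1])
      have ihb := ih (st.1.insert q.1 dd, ([] : List Int) ++ [q.1])
      refine ⟨iha.1.trans ihb.1.symm, ?_⟩
      rw [iha.2, ihb.2]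
      simp
    · have hcf := Bool.eq_false_iff.mpr hc
      have h1 : pvStepB v dd st q = st := by simp [pvStepB, hcf]
      have h2 : pvStepB v dd (st.1, []) q = (st.1, []) := by simp [pvStepB, hcf]
      rw [h1, h2]
      exact ih st

-- A pvStepB fold preserves existing keys/values, and every appended vertex ends with value dd.
theorem pvFold_preserve (v dd : Int) (l : List (Int × Option Int)) :
    ∀ st : PySem.Dict Int Int × List Int,
      (∀ c ∈ st.2, st.1.contains c = true ∧ st.1.getD c 0 = dd) →
      (∀ k, st.1.contains k = true →
        (l.foldl (pvStepB v dd) st).1.contains k = true ∧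
        (l.foldl (pvStepB v dd) st).1.getD k 0 = st.1.getD k 0) ∧
      (∀ c ∈ (l.foldl (pvStepB v dd) st).2,
        (l.foldl (pvStepB v dd) st).1.contains c = true ∧
        (l.foldl (pvStepB v dd) st).1.getD c 0 = dd) := by
  induction l with
  | nil =>
    intro st hacc
    exact ⟨fun k hk => ⟨hk, rfl⟩, hacc⟩
  | cons q l ih =>
    intro st hacc
    simp only [List.foldl_cons]
    by_cases hc : (q.2 == some v && !st.1.contains q.1) = true
    · have hq1 : st.1.contains q.1 = false := by
        rcases Bool.and_eq_true_iff.mp hc with ⟨_, h2⟩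
        simpa using h2
      have h1 : pvStepB v dd st q = (st.1.insert q.1 dd, st.2 ++ [q.1]) := by
        simp [pvStepB, hc]
      rw [h1]
      have hacc' : ∀ c ∈ st.2 ++ [q.1],
          (st.1.insert q.1 dd).contains c = true ∧ (st.1.insert q.1 dd).getD c 0 = dd := by
        intro c hcm
        rcases List.mem_append.mp hcm with hcm | hcm
        · have hcold := hacc c hcm
          have hne : c ≠ q.1 := by
            intro h; rw [h] at hcold; rw [hcold.1] at hq1; cases hq1
          constructor
          · rw [PySem.Dict.contains_insert]; simp [hcold.1]
          · rw [PySem.Dict.getD_insert, if_neg hne]; exact hcold.2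
        · have : c = q.1 := by simpa using hcm
          subst this
          exact ⟨PySem.Dict.contains_insert_self _ _ _, PySem.Dict.getD_insert_self _ _ _ _⟩
      have IH := ih (st.1.insert q.1 dd, st.2 ++ [q.1]) hacc'
      refine ⟨fun k hk => ?_, IH.2⟩
      have hne : k ≠ q.1 := by
        intro h; rw [h] at hk; rw [hk] at hq1; cases hq1
      have hk' : (st.1.insert q.1 dd).contains k = true := by
        rw [PySem.Dict.contains_insert]; simp [hk]
      have := IH.1 k hk'
      refine ⟨this.1, ?_⟩
      rw [this.2]
      show (st.1.insert q.1 dd).getD k 0 = st.1.getD k 0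
      rw [PySem.Dict.getD_insert, if_neg hne]
    · have hcf := Bool.eq_false_iff.mpr hc
      have h1 : pvStepB v dd st q = st := by simp [pvStepB, hcf]
      rw [h1]
      exact ih st hacc

theorem pvBFS_nil (children : PySem.Dict Int (List Int)) (depths : PySem.Dict Int Int) :
    pvBFS children depths [] = depths := by
  rw [pvBFS]

theorem pvBFS_cons (children : PySem.Dict Int (List Int)) (depths : PySem.Dict Int Int)
    (v : Int) (qs : List Int) :
    pvBFS children depths (v :: qs) =
      pvBFS children ((children.getD v []).foldl (pvStepA v) (depths, qs)).1
        ((children.getD v []).foldl (pvStepA v) (depths, qs)).2 := by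
  rw [pvBFS]

theorem pvBLoop_nil (parent_map : List (Int × Option Int)) (depths : PySem.Dict Int Int)
    (d : Int) : pvBLoop parent_map depths [] d = depths := by
  rw [pvBLoop]

theorem pvBLoop_cons (parent_map : List (Int × Option Int)) (depths : PySem.Dict Int Int)
    (v : Int) (fs : List Int) (d : Int) :
    pvBLoop parent_map depths (v :: fs) d =
      pvBLoop parent_map
        ((v :: fs).foldl (fun st v => parent_map.foldl (pvStepB v (d + 1)) st)
          (depths, ([] : List Int))).1
        ((v :: fs).foldl (fun st v => parent_map.foldl (pvStepB v (d + 1)) st)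
          (depths, ([] : List Int))).2
        (d + 1) := by
  rw [pvBLoop]

-- Main simulation: A's queue BFS equals B's level loop, for a queue split as
-- (rest of current level at depth d) ++ (next level built so far at depth d+1).
theorem pvMain (parent_map : List (Int × Option Int)) :
    ∀ (n : Nat) (f1 f2 : List Int) (depths : PySem.Dict Int Int) (d : Int),
      2 * pvDictU (parent_map.map (·.1)) depths + f1.length + 2 * f2.length ≤ n →
      (∀ v ∈ f1, depths.contains v = true ∧ depths.getD v 0 = d) →
      (∀ v ∈ f2, depths.contains v = true ∧ depths.getD v 0 = d + 1) →
      pvBFS (pvChildren parent_map) depths (f1 ++ f2) =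
        pvBLoop parent_map
          (f1.foldl (fun st v => parent_map.foldl (pvStepB v (d + 1)) st) (depths, f2)).1
          (f1.foldl (fun st v => parent_map.foldl (pvStepB v (d + 1)) st) (depths, f2)).2
          (d + 1) := by
  intro n
  induction n with
  | zero =>
    intro f1 f2 depths d hm h1 h2
    have hf1 : f1 = [] := List.eq_nil_of_length_eq_zero (by omega)
    have hf2 : f2 = [] := List.eq_nil_of_length_eq_zero (by omega)
    subst hf1; subst hf2
    simp [pvBFS_nil, pvBLoop_nil]
  | succ n ih =>
    intro f1 f2 depths d hm h1 h2
    match f1 with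
    | [] =>
      match f2 with
      | [] => simp [pvBFS_nil, pvBLoop_nil]
      | w :: ws =>
        simp only [List.nil_append, List.foldl_nil, List.length_nil] at *
        rw [pvBLoop_cons]
        have hmeas : 2 * pvDictU (parent_map.map (·.1)) depths + (w :: ws).length +
            2 * ([] : List Int).length ≤ n := by
          simp only [List.length_cons, List.length_nil] at *
          omega
        have := ih (w :: ws) [] depths (d + 1) hmeas h2 (by simp)
        simpa using this
    | v :: f1' =>
      have hv := h1 v (by simp)
      -- account for the insertions done while processing v
      have hacct := pvFoldl_acct (parent_map.map (·.1)) (pvStepB v (d + 1)) parent_map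
        (fun st q hq => pvStepB_acct parent_map v (d + 1) st q hq) (depths, ([] : List Int))
      have hpres := pvFold_preserve v (d + 1) parent_map (depths, ([] : List Int)) (by simp)
      have hApp1 := pvFold_accApp v (d + 1) parent_map (depths, f1' ++ f2)
      have hApp2 := pvFold_accApp v (d + 1) parent_map (depths, f2)
      rw [List.cons_append, pvBFS_cons, pvChildren_getD,
        pvInner_eq v d parent_map (depths, f1' ++ f2) hv.1 hv.2]
      have hR2 : parent_map.foldl (pvStepB v (d + 1)) (depths, f2) =
          ((parent_map.foldl (pvStepB v (d + 1)) (depths, ([] : List Int))).1,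
           f2 ++ (parent_map.foldl (pvStepB v (d + 1)) (depths, ([] : List Int))).2) :=
        Prod.ext hApp2.1 hApp2.2
      rw [List.foldl_cons]
      conv_rhs => rw [hR2]
      rw [hApp1.1, hApp1.2]
      -- invariants for the next application of ih
      have h1' : ∀ u ∈ f1',
          (parent_map.foldl (pvStepB v (d + 1)) (depths, ([] : List Int))).1.contains u = true ∧
          (parent_map.foldl (pvStepB v (d + 1)) (depths, ([] : List Int))).1.getD u 0 = d := by
        intro u hu
        have hold := h1 u (by simp [hu])
        have := hpres.1 u hold.1
        exact ⟨this.1, by rw [this.2]; exact hold.2⟩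
      have h2' : ∀ u ∈ f2 ++ (parent_map.foldl (pvStepB v (d + 1)) (depths, ([] : List Int))).2,
          (parent_map.foldl (pvStepB v (d + 1)) (depths, ([] : List Int))).1.contains u = true ∧
          (parent_map.foldl (pvStepB v (d + 1)) (depths, ([] : List Int))).1.getD u 0 = d + 1 := by
        intro u hu
        rcases List.mem_append.mp hu with hu | hu
        · have hold := h2 u hu
          have := hpres.1 u hold.1
          exact ⟨this.1, by rw [this.2]; exact hold.2⟩
        · exact hpres.2 u hu
      have hmeas : 2 * pvDictU (parent_map.map (·.1))
            (parent_map.foldl (pvStepB v (d + 1)) (depths, ([] : List Int))).1 +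
          f1'.length +
          2 * (f2 ++ (parent_map.foldl (pvStepB v (d + 1)) (depths, ([] : List Int))).2).length ≤
            n := by
        simp only [List.length_append, List.length_cons, List.length_nil] at *
        omega
      have := ih f1' (f2 ++ (parent_map.foldl (pvStepB v (d + 1)) (depths, ([] : List Int))).2)
        (parent_map.foldl (pvStepB v (d + 1)) (depths, ([] : List Int))).1 d hmeas h1' h2'
      rw [List.append_assoc]
      exact this

-- ===== VERDICT (by name: the statement is the Claim_ definition above) =====
theorem depths_from_parent_map_py_spec : Claim_equal_depths_from_parent_map_py := by
  intro parent_map root _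
  unfold Spec_depths_from_parent_map_py
  match root with
  | none => rfl
  | some r =>
    show (pvBFS (pvChildren parent_map) (PySem.Dict.empty.insert r 0) [r]).items =
         (pvBLoop parent_map (PySem.Dict.empty.insert r 0) [r] 0).items
    congr 1
    have h1 : ∀ v ∈ [r], ((PySem.Dict.empty : PySem.Dict Int Int).insert r 0).contains v = true ∧
        ((PySem.Dict.empty : PySem.Dict Int Int).insert r 0).getD v 0 = 0 := by
      intro v hv
      have : v = r := by simpa using hv
      subst this
      exact ⟨PySem.Dict.contains_insert_self _ _ _, PySem.Dict.getD_insert_self _ _ _ _⟩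
    have h := pvMain parent_map
      (2 * pvDictU (parent_map.map (·.1)) (PySem.Dict.empty.insert r 0) + 1)
      [r] [] (PySem.Dict.empty.insert r 0) 0 (by simp) h1 (by simp)
    rw [pvBLoop_cons]
    simpa using h
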